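-- pv_equiv track=rewrite | github.com/uztbt/cp | HackerRank/CommonChild/CommonChild.py | calcR
-- ===== SOURCE A (Python) =====
-- from collections import defaultdict
--
-- def calcR(s1: str, s2: str):
--     s2Dict = defaultdict(list)
--     for j in range(len(s2)):
--         s2Dict[s2[j]].append(j + 1)  # offset for the LCS
--     s2Dict = {k: list(reversed(v)) for k, v in s2Dict.items()}
--     r = {}
--     for i in range(len(s1)):
--         js = s2Dict.get(s1[i])
--         if js is None:
--             js = []
--         r[i + 1] = js  # offset for the LCS
--     return r
-- ===== SOURCE B (Python) =====
-- def calcR(s1: str, s2: str):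
--     index = {}
--     for i, c in enumerate(s1):
--         index.setdefault(c, []).append(i)
--     r = {i + 1: [] for i in range(len(s1))}
--     for j in range(len(s2) - 1, -1, -1):
--         for i in index.get(s2[j], ()):
--             r[i + 1].append(j + 1)
--     return r
-- ===== Notes on version B (the rewrite author's own statement) =====
-- stated objective: alternative
-- what changed: Inverts the data flow: instead of A's dict of s2 positions per character (built ascending, copied reversed, then looked up for each s1 index), B builds an inverted index of s1's characters, pre-seeds every result key with [], and scatters s2 positions onto the matching s1 indices while scanning s2 backwards, so the descending lists are built directly with no reverse pass.
import Mathlib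
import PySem

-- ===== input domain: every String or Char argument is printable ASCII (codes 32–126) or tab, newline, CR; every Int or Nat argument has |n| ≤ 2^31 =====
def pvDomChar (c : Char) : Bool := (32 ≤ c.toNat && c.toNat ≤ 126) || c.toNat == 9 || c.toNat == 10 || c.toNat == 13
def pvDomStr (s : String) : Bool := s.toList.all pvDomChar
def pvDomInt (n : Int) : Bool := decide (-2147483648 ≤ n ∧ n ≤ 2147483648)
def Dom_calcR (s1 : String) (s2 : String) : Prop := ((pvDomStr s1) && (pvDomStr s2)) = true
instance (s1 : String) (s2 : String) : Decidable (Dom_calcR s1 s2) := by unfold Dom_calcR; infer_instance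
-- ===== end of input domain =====

-- B inverts the data flow: instead of A's dict of s2 positions (built ascending, copied
-- reversed, then looked up per s1 index), B builds an inverted index of s1 and scatters
-- s2 positions onto it while scanning s2 backwards (objective: alternative decomposition).

-- ===== PORT A =====
def calcR (s1 : String) (s2 : String) : List (Int × List Int) :=
  let l2 := s2.toList
  -- s2Dict = defaultdict(list); for j in range(len(s2)): s2Dict[s2[j]].append(j + 1)
  let s2Dict : PySem.Dict Char (List Int) :=
    (PySem.List.pyRange 0 (PySem.List.len l2) 1).foldl
      (fun d j => d.modify (PySem.List.pyGetD l2 j ' ') [] (fun v => v ++ [j + 1]))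
      PySem.Dict.empty
  -- s2Dict = {k: list(reversed(v)) for k, v in s2Dict.items()}
  let s2Dict' : PySem.Dict Char (List Int) :=
    s2Dict.items.foldl (fun d p => d.insert p.1 p.2.reverse) PySem.Dict.empty
  -- r = {}; for i in range(len(s1)): js = s2Dict.get(s1[i]); if js is None: js = []; r[i+1] = js
  let l1 := s1.toList
  let r : PySem.Dict Int (List Int) :=
    (PySem.List.pyRange 0 (PySem.List.len l1) 1).foldl
      (fun r i =>
        let js := match s2Dict'.get? (PySem.List.pyGetD l1 i ' ') with
                  | none => []
                  | some v => v
        r.insert (i + 1) js)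
      PySem.Dict.empty
  r.items

-- ===== PORT B =====
def calcR_alt (s1 : String) (s2 : String) : List (Int × List Int) :=
  let l1 := s1.toList
  -- index = {}; for i, c in enumerate(s1): index.setdefault(c, []).append(i)
  let idx : PySem.Dict Char (List Int) :=
    (PySem.List.enumerate l1).foldl
      (fun d p => d.modify p.2 [] (fun v => v ++ [p.1])) PySem.Dict.empty
  -- r = {i + 1: [] for i in range(len(s1))}
  let r0 : PySem.Dict Int (List Int) :=
    (PySem.List.pyRange 0 (PySem.List.len l1) 1).foldl
      (fun d i => d.insert (i + 1) []) PySem.Dict.empty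
  let l2 := s2.toList
  -- for j in range(len(s2)-1, -1, -1): for i in index.get(s2[j], ()): r[i+1].append(j+1)
  -- (r[i+1] is always a present key here — every i comes from enumerate(s1) — so
  --  Python's r[i+1].append is exactly modify with the never-used default [])
  let r : PySem.Dict Int (List Int) :=
    (PySem.List.pyRange (PySem.List.len l2 - 1) (-1) (-1)).foldl
      (fun r j =>
        (idx.getD (PySem.List.pyGetD l2 j ' ') []).foldl
          (fun r i => r.modify (i + 1) [] (fun v => v ++ [j + 1])) r)
      r0
  r.items

-- ===== PRECONDITION & SPEC =====
def Spec_calcR (s1 : String) (s2 : String) (out : List (Int × List Int)) : Prop := out = calcR_alt s1 s2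
instance (s1 : String) (s2 : String) (out : List (Int × List Int)) : Decidable (Spec_calcR s1 s2 out) := by unfold Spec_calcR; infer_instance

-- ===== CLAIM (what is proved, stated in full; the proofs are below) =====
def Claim_equal_calcR : Prop := ∀ (s1 : String) (s2 : String), Dom_calcR s1 s2 → Spec_calcR s1 s2 (calcR s1 s2)

-- ===== LEMMAS AND PROOFS =====

-- generic helpers ------------------------------------------------------------
lemma update_of_subset {α : Type} [BEq α] [LawfulBEq α] (s : PySem.Set α) (xs : List α)
    (h : ∀ x ∈ xs, x ∈ s) : PySem.Set.update s xs = s := by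
  induction xs generalizing s with
  | nil => rfl
  | cons x xs ih =>
      have hx : PySem.Set.add s x = s := by
        simp [PySem.Set.add, PySem.Set.contains, h x (by simp)]
      simp only [PySem.Set.update, List.foldl_cons, hx]
      exact ih s (fun y hy => h y (by simp [hy]))

lemma filter_beq_of_nodup (l : List Int) (i : Int) (h : l.Nodup) :
    l.filter (fun x => x == i) = if i ∈ l then [i] else [] := by
  induction l with
  | nil => simp
  | cons x xs ih =>
      rcases List.nodup_cons.mp h with ⟨hx, hxs⟩
      by_cases hxi : x = i
      · subst hxi
        simp [hx, ih hxs]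
      · simp [hxi, ih hxs, Ne.symm hxi]

lemma filter_map_eq_flatMap {α β : Type} (l : List α) (p : α → Bool) (h : α → β) :
    (l.filter p).map h = l.flatMap (fun x => if p x then [h x] else []) := by
  induction l with
  | nil => rfl
  | cons x xs ih => by_cases hp : p x <;> simp [hp, ih]

-- A's first dict (s2 positions per character), as a named helper -------------
def dictA (l2 : List Char) : PySem.Dict Char (List Int) :=
  (PySem.List.pyRange 0 (PySem.List.len l2) 1).foldl
    (fun d j => d.modify (PySem.List.pyGetD l2 j ' ') [] (fun v => v ++ [j + 1]))
    PySem.Dict.empty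

lemma lemA (l2 : List Char) (c : Char) :
    (dictA l2).getD c []
      = ((PySem.List.pyRange 0 (PySem.List.len l2) 1).filter
          (fun j => PySem.List.pyGetD l2 j ' ' == c)).map (fun j => j + 1) := by
  have hh := PySem.Dict.getD_foldl_modify_append
      ((PySem.List.pyRange 0 (PySem.List.len l2) 1).map
        (fun j => (PySem.List.pyGetD l2 j ' ', j + 1))) (PySem.Dict.empty) c
  rw [List.foldl_map] at hh
  simpa [dictA, List.filter_map, Function.comp] using hh

lemma nodupA (l2 : List Char) : (dictA l2).keys.Nodup := by
  exact PySem.Dict.nodup_keys_foldl_modify_key _ (fun j => PySem.List.pyGetD l2 j ' ')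
    [] (fun _ j => (fun v => v ++ [j + 1])) PySem.Dict.empty List.nodup_nil

lemma lemB {κ : Type} [BEq κ] [LawfulBEq κ] (d : PySem.Dict κ (List Int))
    (hk : d.keys.Nodup) (c : κ) :
    (d.items.foldl (fun d p => d.insert p.1 p.2.reverse) PySem.Dict.empty).get? c
      = (d.get? c).map List.reverse := by
  have hitems := PySem.Dict.items_foldl_insert_fresh d.items (fun p => p.1)
      (fun p => p.2.reverse) PySem.Dict.empty (fun a _ => rfl) hk
  simp only [PySem.Dict.get?, hitems]
  have hemp : (PySem.Dict.empty : PySem.Dict κ (List Int)).items = [] := rfl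
  have hpr : ((fun (p : κ × List Int) => p.1 == c) ∘ fun (a : κ × List Int) => (a.1, a.2.reverse))
      = fun (a : κ × List Int) => a.1 == c := rfl
  rw [hemp]
  simp only [List.nil_append, List.find?_map, hpr]
  cases List.find? (fun (a : κ × List Int) => a.1 == c) d.items <;> simp

-- the reversed ascending position list is the descending scan
lemma lemRev (l2 : List Char) (c : Char) :
    (((PySem.List.pyRange 0 (PySem.List.len l2) 1).filter
        (fun j => PySem.List.pyGetD l2 j ' ' == c)).map (fun j => j + 1)).reverse
      = ((PySem.List.pyRange (PySem.List.len l2 - 1) (-1) (-1)).filter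
          (fun j => PySem.List.pyGetD l2 j ' ' == c)).map (fun j => j + 1) := by
  rw [PySem.List.pyRange_neg_one_eq_reverse]
  norm_num

-- value assigned by A at character c, in descending-scan form
lemma lemVal (l2 : List Char) (c : Char) :
    (match ((dictA l2).items.foldl (fun d p => d.insert p.1 p.2.reverse)
              PySem.Dict.empty).get? c with
     | none => ([] : List Int)
     | some v => v)
      = ((PySem.List.pyRange (PySem.List.len l2 - 1) (-1) (-1)).filter
          (fun j => PySem.List.pyGetD l2 j ' ' == c)).map (fun j => j + 1) := by
  rw [lemB (dictA l2) (nodupA l2) c, ← lemRev]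
  have hA := lemA l2 c
  cases hg : (dictA l2).get? c with
  | none => simp [PySem.Dict.getD, hg] at hA ⊢; exact hA
  | some v => simp [PySem.Dict.getD, hg] at hA; simp [hA]

-- B's inverted index of s1 ---------------------------------------------------
def dIdx (l1 : List Char) : PySem.Dict Char (List Int) :=
  (PySem.List.enumerate l1).foldl
    (fun d p => d.modify p.2 [] (fun v => v ++ [p.1])) PySem.Dict.empty

lemma dIdx_getD (l1 : List Char) (c : Char) :
    (dIdx l1).getD c []
      = ((PySem.List.enumerate l1).filter (fun p => p.2 == c)).map (·.1) := by
  have hh := PySem.Dict.getD_foldl_modify_append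
      ((PySem.List.enumerate l1).map (fun p => (p.2, p.1))) PySem.Dict.empty c
  rw [List.foldl_map] at hh
  simpa [dIdx, List.filter_map, Function.comp] using hh

lemma mem_dIdx (l1 : List Char) (c : Char) (i : Int) :
    i ∈ (dIdx l1).getD c []
      ↔ (0 ≤ i ∧ i < (l1.length : Int) ∧ PySem.List.pyGetD l1 i ' ' = c) := by
  rw [dIdx_getD]
  simp only [List.mem_map, List.mem_filter, PySem.List.mem_enumerate_iff]
  constructor
  · rintro ⟨p, ⟨⟨k, hk, rfl⟩, hc⟩, rfl⟩
    simp only [zero_add] at *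
    refine ⟨by positivity, by exact_mod_cast hk, ?_⟩
    rw [PySem.List.pyGetD_natCast]
    simpa [List.getD_eq_getElem?_getD, hk] using (by simpa using hc : l1[k] = c)
  · rintro ⟨h0, hlt, hc⟩
    refine ⟨(i, c), ⟨⟨i.toNat, by omega, ?_⟩, by simp⟩, rfl⟩
    have : ((i.toNat : Int)) = i := by omega
    rw [← hc, PySem.List.pyGetD_eq_getElem l1 ' ' h0 (by exact_mod_cast hlt)]
    simp [this]

lemma nodup_dIdx (l1 : List Char) (c : Char) : ((dIdx l1).getD c []).Nodup := by
  rw [dIdx_getD]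
  have hpw : ((PySem.List.enumerate l1).filter (fun p => p.2 == c)).Pairwise
      (fun p q => p.1 < q.1) := (PySem.List.pairwise_lt_enumerate l1 0).filter _
  exact (List.pairwise_map.mpr hpw).nodup

-- B's pre-seeded result dict -------------------------------------------------
def dR0 (l1 : List Char) : PySem.Dict Int (List Int) :=
  (PySem.List.pyRange 0 (PySem.List.len l1) 1).foldl
    (fun d i => d.insert (i + 1) []) PySem.Dict.empty

lemma dR0_items (l1 : List Char) :
    (dR0 l1).items
      = (PySem.List.pyRange 0 (PySem.List.len l1) 1).map (fun i => (i + 1, ([] : List Int))) := by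
  have := PySem.Dict.items_foldl_insert_fresh (PySem.List.pyRange 0 (PySem.List.len l1) 1)
      (fun i => i + 1) (fun _ => ([] : List Int)) PySem.Dict.empty (fun a _ => rfl)
      ((PySem.List.nodup_pyRange_one 0 _).map (fun a b h => by omega))
  simpa [dR0] using this

lemma dR0_keys (l1 : List Char) :
    (dR0 l1).keys = (PySem.List.pyRange 0 (PySem.List.len l1) 1).map (fun i => i + 1) := by
  simp [PySem.Dict.keys, dR0_items]

lemma dR0_keys_nodup (l1 : List Char) : (dR0 l1).keys.Nodup := by
  rw [dR0_keys]
  exact (PySem.List.nodup_pyRange_one 0 _).map (fun a b h => by omega)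

lemma dR0_getD (l1 : List Char) (k : Int) : (dR0 l1).getD k [] = [] := by
  simp only [PySem.Dict.getD, PySem.Dict.get?, dR0_items, List.find?_map]
  cases List.find? _ (PySem.List.pyRange 0 (PySem.List.len l1) 1) <;> simp

-- B's scatter loop, flattened ------------------------------------------------
def dOps (l1 : List Char) (l2 : List Char) : List (Int × Int) :=
  (PySem.List.pyRange (PySem.List.len l2 - 1) (-1) (-1)).flatMap
    (fun j => ((dIdx l1).getD (PySem.List.pyGetD l2 j ' ') []).map (fun i => (i + 1, j + 1)))

def dScatter (l1 : List Char) (l2 : List Char) : PySem.Dict Int (List Int) :=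
  (PySem.List.pyRange (PySem.List.len l2 - 1) (-1) (-1)).foldl
    (fun r j =>
      ((dIdx l1).getD (PySem.List.pyGetD l2 j ' ') []).foldl
        (fun r i => r.modify (i + 1) [] (fun v => v ++ [j + 1])) r)
    (dR0 l1)

lemma dScatter_eq_flat (l1 l2 : List Char) :
    dScatter l1 l2
      = (dOps l1 l2).foldl (fun r p => r.modify p.1 [] (fun v => v ++ [p.2])) (dR0 l1) := by
  rw [dScatter, dOps, List.foldl_flatMap]
  congr 1
  funext r j
  rw [List.foldl_map]

lemma dScatter_getD (l1 l2 : List Char) (k : Int) :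
    (dScatter l1 l2).getD k []
      = ((dOps l1 l2).filter (fun p => p.1 == k)).map (·.2) := by
  rw [dScatter_eq_flat]
  have := PySem.Dict.getD_foldl_modify_append (dOps l1 l2) (dR0 l1) k
  rw [this, dR0_getD, List.nil_append]

lemma dScatter_keys (l1 l2 : List Char) : (dScatter l1 l2).keys = (dR0 l1).keys := by
  rw [dScatter_eq_flat]
  rw [PySem.Dict.keys_foldl_modify_key (dOps l1 l2) (fun p => p.1) []
        (fun _ p => (fun v => v ++ [p.2])) (dR0 l1)]
  apply update_of_subset
  intro x hx
  rcases List.mem_map.mp hx with ⟨p, hp, rfl⟩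
  rcases List.mem_flatMap.mp hp with ⟨j, _, hpj⟩
  rcases List.mem_map.mp hpj with ⟨i, hi, rfl⟩
  rcases (mem_dIdx l1 _ i).mp hi with ⟨h0, hlt, _⟩
  rw [dR0_keys]
  exact List.mem_map.mpr ⟨i, (PySem.List.mem_pyRange_one).mpr ⟨h0, by simpa [PySem.List.len] using hlt⟩, rfl⟩

lemma dScatter_keys_nodup (l1 l2 : List Char) : (dScatter l1 l2).keys.Nodup := by
  rw [dScatter_keys]; exact dR0_keys_nodup l1

lemma dScatter_items (l1 l2 : List Char) :
    (dScatter l1 l2).items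
      = (PySem.List.pyRange 0 (PySem.List.len l1) 1).map
          (fun i => (i + 1, (dScatter l1 l2).getD (i + 1) [])) := by
  rw [PySem.Dict.items_eq_map_keys (dScatter l1 l2) (dScatter_keys_nodup l1 l2) [],
      dScatter_keys, dR0_keys, List.map_map]
  rfl

lemma dScatter_value (l1 l2 : List Char) (i : Int) (h0 : 0 ≤ i) (hlt : i < (l1.length : Int)) :
    ((dOps l1 l2).filter (fun p => p.1 == i + 1)).map (·.2)
      = ((PySem.List.pyRange (PySem.List.len l2 - 1) (-1) (-1)).filter
          (fun j => PySem.List.pyGetD l2 j ' ' == PySem.List.pyGetD l1 i ' ')).map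
          (fun j => j + 1) := by
  rw [dOps, List.filter_flatMap, List.map_flatMap,
      filter_map_eq_flatMap]
  apply List.flatMap_congr
  intro j _
  rw [List.filter_map]
  have hpred : ∀ x ∈ (dIdx l1).getD (PySem.List.pyGetD l2 j ' ') [],
      ((fun p => p.1 == i + 1) ∘ (fun i' => (i' + 1, j + 1))) x = (x == i) := by
    intro x _
    by_cases hx : x = i <;> simp [hx]
  rw [List.filter_congr hpred, filter_beq_of_nodup _ _ (nodup_dIdx l1 _)]
  by_cases hc : PySem.List.pyGetD l1 i ' ' = PySem.List.pyGetD l2 j ' '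
  · have : i ∈ (dIdx l1).getD (PySem.List.pyGetD l2 j ' ') [] :=
      (mem_dIdx l1 _ i).mpr ⟨h0, hlt, hc⟩
    simp [this, hc]
  · have : i ∉ (dIdx l1).getD (PySem.List.pyGetD l2 j ' ') [] := by
      intro hmem
      exact hc ((mem_dIdx l1 _ i).mp hmem).2.2
    have hne : ¬(PySem.List.pyGetD l2 j ' ' = PySem.List.pyGetD l1 i ' ') := fun hh => hc hh.symm
    simp [this, hne]

-- ===== VERDICT (by name: the statement is the Claim_ definition above) =====
theorem calcR_spec : Claim_equal_calcR := by
  intro s1 s2 _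
  show calcR s1 s2 = calcR_alt s1 s2
  unfold calcR
  -- A's side: items of the final insert loop, then each value in descending-scan form
  have hr := PySem.Dict.items_foldl_insert_fresh
      (PySem.List.pyRange 0 (PySem.List.len s1.toList) 1)
      (fun i => i + 1)
      (fun i => match ((dictA s2.toList).items.foldl (fun d p => d.insert p.1 p.2.reverse)
                  PySem.Dict.empty).get? (PySem.List.pyGetD s1.toList i ' ') with
                | none => ([] : List Int)
                | some v => v)
      PySem.Dict.empty (fun a _ => rfl)
      ((PySem.List.nodup_pyRange_one 0 _).map (fun a b h => by omega))
  simp only [dictA] at hr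
  rw [hr]
  have hemp : (PySem.Dict.empty : PySem.Dict Int (List Int)).items = [] := rfl
  rw [hemp, List.nil_append]
  -- B's side
  show _ = (dScatter s1.toList s2.toList).items
  rw [dScatter_items]
  refine List.map_congr_left (fun i hi => ?_)
  rcases (PySem.List.mem_pyRange_one).mp hi with ⟨h0, hlt⟩
  have hv := lemVal s2.toList (PySem.List.pyGetD s1.toList i ' ')
  simp only [dictA] at hv
  rw [hv, dScatter_getD,
      dScatter_value s1.toList s2.toList i h0 (by simpa [PySem.List.len] using hlt)]
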